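-- pv_equiv track=rewrite | github.com/kyauy/ClinFly | clinphen_src/get_phenotypes_lf.py | load_medical_record_subsentences
-- ===== SOURCE A (Python) =====
-- point_enders = [".", u'•', '•', ";", "\t"]
--
-- def end_of_point(word):
--   #for char in point_enders:
--   #  if char in word: return True
--   if word[-1] in point_enders: return True
--   if word == "but": return True
--   if word == "except": return True
--   if word == "however": return True
--   if word == "though": return True
--   return False
--
-- subpoint_enders = [":", ','] #","
--
-- def end_of_subpoint(word):
--   if word[-1] in subpoint_enders: return True
--   if word == "and": return True
--   return False
--
-- def string_to_record_linewise(medical_record):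
--   return medical_record.split("\n")
--
-- def load_medical_record_linewise(medical_record):
--   recordFile = string_to_record_linewise(medical_record)
--   sentences = []
--   for line in recordFile:
--     if ":" not in line: continue
--     curSentence = []
--     for word in line.strip().split(" "):
--       word = word.lower()
--       if len(word) < 1: continue
--       curSentence.append(word)
--       if end_of_point(word):
--         sentences.append(" ".join(curSentence))
--         curSentence = []
--     if len(curSentence) > 0: sentences.append(" ".join(curSentence))
--   subsentence_sets = []
--   for sent in sentences:
--     subsents = []
--     curSubsent = []
--     for word in sent.split(" "):
--       word = word.lower()
--       curSubsent.append(word)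
--       if end_of_subpoint(word):
--         subsents.append(" ".join(curSubsent))
--         curSubsent = []
--     if len(curSubsent) > 0: subsents.append(" ".join(curSubsent))
--     subsentence_sets.append(subsents)
--   return subsentence_sets
--
-- def string_to_record_nonlinewise(medical_record):
--   listForm = []
--   for line in medical_record.split("\n"):
--     if len(line) < 1: continue
--     listForm.append(line)
--   return " ".join(listForm).split(" ")
--
-- def load_medical_record_subsentences(medical_record):
--   record = string_to_record_nonlinewise(medical_record)
--   sentences = []
--   curSentence = []
--   for word in record:
--     word = word.lower()
--     if len(word) < 1: continue
--     curSentence.append(word)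
--     if end_of_point(word):
--       sentences.append(" ".join(curSentence))
--       curSentence = []
--   if len(curSentence) > 0: sentences.append(" ".join(curSentence))
--   subsentence_sets = []
--   for sent in sentences:
--     subsents = []
--     curSubsent = []
--     for word in sent.split(" "):
--       word = word.lower()
--       curSubsent.append(word)
--       if end_of_subpoint(word):
--         subsents.append(" ".join(curSubsent))
--         curSubsent = []
--     if len(curSubsent) > 0: subsents.append(" ".join(curSubsent))
--     subsentence_sets.append(subsents)
--   return subsentence_sets + load_medical_record_linewise(medical_record)
-- ===== SOURCE B (Python) =====
-- # B: single fused pass over the word stream (subsentences built directly, no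
-- # join-then-resplit sentence phase).
--
-- point_enders = [".", '\u2022', '\u2022', ";", "\t"]
-- subpoint_enders = [":", ',']
-- sentence_breakers = ("but", "except", "however", "though")
--
--
-- def _ends_sub(w):
--     return w[-1] in subpoint_enders or w == "and"
--
--
-- def _ends_point(w):
--     return w[-1] in point_enders or w in sentence_breakers
--
--
-- def _fused(words, out):
--     subsents, cur = [], []
--     for w in words:
--         w = w.lower()
--         if not w:
--             continue
--         cur.append(w)
--         if _ends_sub(w):
--             subsents.append(" ".join(cur))
--             cur = []
--         if _ends_point(w):
--             if cur:
--                 subsents.append(" ".join(cur))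
--                 cur = []
--             out.append(subsents)
--             subsents = []
--     if cur:
--         subsents.append(" ".join(cur))
--     if subsents:
--         out.append(subsents)
--
--
-- def load_medical_record_subsentences(medical_record):
--     lines = medical_record.split("\n")
--     out = []
--     _fused(" ".join(l for l in lines if l).split(" "), out)
--     for line in lines:
--         if ":" in line:
--             _fused(line.strip().split(" "), out)
--     return out
-- ===== Notes on version B (the rewrite author's own statement) =====
-- stated objective: alternative
-- what changed: Replaces A's two-phase pipeline (accumulate joined sentence strings, then re-split and re-lower each sentence into subsentences) with a single fused pass over the word stream that maintains the current subsentence and the current sentence's subsentence list directly, flushing them on subpoint/point ender words; the same fused pass is applied once to the nonlinewise word stream and once per qualifying colon-containing line.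
import Mathlib
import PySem

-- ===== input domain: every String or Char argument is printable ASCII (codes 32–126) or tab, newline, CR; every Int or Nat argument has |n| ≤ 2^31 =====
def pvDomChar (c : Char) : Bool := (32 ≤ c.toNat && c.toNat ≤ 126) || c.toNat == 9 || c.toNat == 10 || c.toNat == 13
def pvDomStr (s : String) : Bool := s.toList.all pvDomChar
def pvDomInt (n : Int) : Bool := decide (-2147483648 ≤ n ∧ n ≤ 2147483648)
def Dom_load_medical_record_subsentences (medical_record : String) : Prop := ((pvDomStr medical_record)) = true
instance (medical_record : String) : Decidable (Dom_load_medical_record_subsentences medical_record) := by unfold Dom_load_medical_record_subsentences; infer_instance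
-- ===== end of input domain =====

-- B fuses A's two phases (build sentence strings, then re-split each into subsentences)
-- into one pass over the word stream; equivalence of the return values is proved.

-- ===== PORT A =====
-- Python's point_enders are five one-char strings ('•' listed twice); 'word[-1] in
-- point_enders' is membership of the last CHAR, ported as a Char list — exact.
def pvPointEnders : List Char := ['.', '•', '•', ';', '\t']

-- word[-1] raises IndexError on ''; every call site in A skips empty words first, so the
-- empty case is unreachable; ported as getLast? with none → false (no branch fires on '').
def end_of_point (word : List Char) : Bool :=
  match word.getLast? with
  | none => false
  | some c =>
    if pvPointEnders.contains c then true
    else if word = ['b','u','t'] then true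
    else if word = ['e','x','c','e','p','t'] then true
    else if word = ['h','o','w','e','v','e','r'] then true
    else if word = ['t','h','o','u','g','h'] then true
    else false

def pvSubpointEnders : List Char := [':', ',']

def end_of_subpoint (word : List Char) : Bool :=
  match word.getLast? with
  | none => false
  | some c =>
    if pvSubpointEnders.contains c then true
    else if word = ['a','n','d'] then true
    else false

-- A's sentence-building loop (curSentence, sentences accumulator)
def sentLoopA : List (List Char) → List (List Char) → List (List Char) → List (List Char)
  | [], cur, acc => if cur.length > 0 then acc ++ [PySem.Chars.join [' '] cur] else acc
  | w :: rest, cur, acc =>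
    let w' := PySem.Chars.lower w
    if w'.length < 1 then sentLoopA rest cur acc
    else
      let cur' := cur ++ [w']
      if end_of_point w' then sentLoopA rest [] (acc ++ [PySem.Chars.join [' '] cur'])
      else sentLoopA rest cur' acc

-- A's subsentence loop over the words of one sentence (curSubsent, subsents accumulator)
def subLoopA : List (List Char) → List (List Char) → List (List Char) → List (List Char)
  | [], cur, subs => if cur.length > 0 then subs ++ [PySem.Chars.join [' '] cur] else subs
  | w :: rest, cur, subs =>
    let w' := PySem.Chars.lower w
    let cur' := cur ++ [w']
    if end_of_subpoint w' then subLoopA rest [] (subs ++ [PySem.Chars.join [' '] cur'])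
    else subLoopA rest cur' subs

def subsplitA (sent : List Char) : List (List Char) :=
  subLoopA (PySem.Chars.splitOn sent [' ']) [] []

def string_to_record_nonlinewise (mr : List Char) : List (List Char) :=
  PySem.Chars.splitOn
    (PySem.Chars.join [' ']
      ((PySem.Chars.splitOn mr ['\n']).foldl
        (fun acc line => if line.length < 1 then acc else acc ++ [line]) []))
    [' ']

def load_medical_record_linewise (mr : List Char) : List (List (List Char)) :=
  ((PySem.Chars.splitOn mr ['\n']).foldl
    (fun acc line =>
      if PySem.Chars.isIn [':'] line = false then acc
      else sentLoopA (PySem.Chars.splitOn (PySem.Chars.strip line) [' ']) [] acc)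
    []).map subsplitA

def load_medical_record_subsentences (medical_record : String) : List (List String) :=
  let mr := medical_record.toList
  let sentences := sentLoopA (string_to_record_nonlinewise mr) [] []
  let subsentence_sets := sentences.map subsplitA
  (subsentence_sets ++ load_medical_record_linewise mr).map (fun set => set.map String.ofList)

-- ===== PORT B =====
def pvPointEndersB : List Char := ['.', '•', '•', ';', '\t']
def pvSubpointEndersB : List Char := [':', ',']

def endsSubB (w : List Char) : Bool :=
  w.getLast?.elim false (fun c => pvSubpointEndersB.contains c) || w = ['a','n','d']

def endsPointB (w : List Char) : Bool :=
  w.getLast?.elim false (fun c => pvPointEndersB.contains c) ||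
    (w = ['b','u','t'] || w = ['e','x','c','e','p','t'] ||
     w = ['h','o','w','e','v','e','r'] || w = ['t','h','o','u','g','h'])

-- B's single fused pass: subsents/cur are flushed on subpoint/point enders, the whole
-- subsents set on point enders; trailing flushes at end of stream.
def fusedB : List (List Char) → List (List Char) → List (List Char) →
    List (List (List Char)) → List (List (List Char))
  | [], subs, cur, out =>
    let subs' := if cur ≠ [] then subs ++ [PySem.Chars.join [' '] cur] else subs
    if subs' ≠ [] then out ++ [subs'] else out
  | w :: rest, subs, cur, out =>
    let w' := PySem.Chars.lower w
    if w' = [] then fusedB rest subs cur out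
    else
      let cur₁ := cur ++ [w']
      let st := if endsSubB w' then (subs ++ [PySem.Chars.join [' '] cur₁], ([] : List (List Char)))
                else (subs, cur₁)
      if endsPointB w' then
        let subs' := if st.2 ≠ [] then st.1 ++ [PySem.Chars.join [' '] st.2] else st.1
        fusedB rest [] [] (out ++ [subs'])
      else fusedB rest st.1 st.2 out

def load_medical_record_subsentences_alt (medical_record : String) : List (List String) :=
  let lines := PySem.Chars.splitOn medical_record.toList ['\n']
  let out₀ := fusedB
    (PySem.Chars.splitOn (PySem.Chars.join [' '] (lines.filter (· ≠ []))) [' ']) [] [] []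
  let out := lines.foldl
    (fun out line =>
      if PySem.Chars.isIn [':'] line then
        fusedB (PySem.Chars.splitOn (PySem.Chars.strip line) [' ']) [] [] out
      else out) out₀
  out.map (fun set => set.map String.ofList)

-- ===== PRECONDITION & SPEC =====
def Spec_load_medical_record_subsentences (medical_record : String) (out : List (List String)) : Prop := out = load_medical_record_subsentences_alt medical_record
instance (medical_record : String) (out : List (List String)) : Decidable (Spec_load_medical_record_subsentences medical_record out) := by unfold Spec_load_medical_record_subsentences; infer_instance

-- ===== CLAIM (what is proved, stated in full; the proofs are below) =====
def Claim_equal_load_medical_record_subsentences : Prop := ∀ (medical_record : String), Dom_load_medical_record_subsentences medical_record → Spec_load_medical_record_subsentences medical_record (load_medical_record_subsentences medical_record)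

-- ===== LEMMAS AND PROOFS =====

-- clean single-char split (proof-side model of Python's s.split(" "))
def splitSp : List Char → List (List Char)
  | [] => [[]]
  | c :: rest =>
    if c = ' ' then [] :: splitSp rest
    else
      match splitSp rest with
      | [] => [[c]]        -- unreachable: splitSp is never []
      | h :: t => (c :: h) :: t

theorem splitSp_ne_nil (l : List Char) : splitSp l ≠ [] := by
  cases l with
  | nil => simp [splitSp]
  | cons c rest =>
    simp only [splitSp]
    split
    · simp
    · cases h : splitSp rest <;> simp

theorem splitOn_go_eq (fuel : Nat) (l cur : List Char) (acc : List (List Char))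
    (hf : l.length < fuel) :
    PySem.Chars.splitOn.go [' '] fuel l cur acc =
      acc.reverse ++
        (match splitSp l with
         | [] => [cur.reverse]
         | h :: t => (cur.reverse ++ h) :: t) := by
  induction fuel generalizing l cur acc with
  | zero => omega
  | succ f ih =>
    cases l with
    | nil => simp [PySem.Chars.splitOn.go, splitSp]
    | cons c rest =>
      by_cases hc : c = ' '
      · subst hc
        have hp : List.isPrefixOf [' '] (' ' :: rest) = true := by
          simp [List.isPrefixOf]
        rw [PySem.Chars.splitOn.go]
        simp only [hp, if_pos, List.length_cons, List.length_nil, List.drop_succ_cons,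
          List.drop_zero]
        rw [ih rest [] (cur.reverse :: acc) (by simp at hf ⊢; omega)]
        cases h : splitSp rest with
        | nil => exact absurd h (splitSp_ne_nil rest)
        | cons x t => simp [splitSp, h]
      · have hp : List.isPrefixOf [' '] (c :: rest) = false := by
          simp only [List.isPrefixOf, Bool.and_eq_false_iff]
          left
          exact decide_eq_false (fun h => hc h.symm)
        rw [PySem.Chars.splitOn.go]
        rw [if_neg (by simp [hp])]
        rw [ih rest (c :: cur) acc (by simp at hf ⊢; omega)]
        cases h : splitSp rest with
        | nil => exact absurd h (splitSp_ne_nil rest)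
        | cons x t => simp [splitSp, h, hc]

theorem splitOn_space_eq (l : List Char) :
    PySem.Chars.splitOn l [' '] = splitSp l := by
  rw [PySem.Chars.splitOn, splitOn_go_eq l.length.succ l [] [] (by omega)]
  cases h : splitSp l with
  | nil => exact absurd h (splitSp_ne_nil l)
  | cons x t => simp

theorem splitSp_spacefree {l : List Char} {w : List Char} (hw : w ∈ splitSp l) : ' ' ∉ w := by
  induction l generalizing w with
  | nil => simp [splitSp] at hw; simp [hw]
  | cons c rest ih =>
    simp only [splitSp] at hw
    split at hw
    · rcases List.mem_cons.mp hw with h | h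
      · simp [h]
      · exact ih h
    · rename_i hc
      cases hsp : splitSp rest with
      | nil => exact absurd hsp (splitSp_ne_nil rest)
      | cons x t =>
        rw [hsp] at hw
        rcases List.mem_cons.mp hw with h | h
        · subst h
          intro hmem
          rcases List.mem_cons.mp hmem with h' | h'
          · exact hc h'.symm
          · exact ih (by simp [hsp]) h'
        · exact ih (by simp [hsp, h])

theorem splitSp_append_spacefree (w l : List Char) (hw : ' ' ∉ w) :
    splitSp (w ++ l) =
      match splitSp l with
      | [] => [w]
      | h :: t => (w ++ h) :: t := by
  induction w with
  | nil =>
    cases h : splitSp l with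
    | nil => exact absurd h (splitSp_ne_nil l)
    | cons x t => exact h
  | cons c w ih =>
    have hc : c ≠ ' ' := fun h => hw (by simp [h])
    have hw' : ' ' ∉ w := fun h => hw (by simp [h])
    cases h : splitSp l with
    | nil => exact absurd h (splitSp_ne_nil l)
    | cons x t =>
      simp only [List.cons_append, splitSp, if_neg hc, ih hw', h]

theorem splitSp_intercalate {ws : List (List Char)} (hne : ws ≠ [])
    (hsf : ∀ w ∈ ws, ' ' ∉ w) :
    splitSp (List.intercalate [' '] ws) = ws := by
  induction ws with
  | nil => exact absurd rfl hne
  | cons w rest ih =>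
    cases rest with
    | nil =>
      simp only [List.intercalate, List.intersperse, List.flatten]
      have : splitSp (w ++ []) = [w] := by
        rw [splitSp_append_spacefree w [] (hsf w (by simp))]
        simp [splitSp]
      simpa using this
    | cons v rest' =>
      have hrt : List.intercalate [' '] (v :: rest') ≠ [] → True := fun _ => trivial
      have hi : List.intercalate [' '] (w :: v :: rest') =
          w ++ ' ' :: List.intercalate [' '] (v :: rest') := by
        simp [List.intercalate, List.intersperse]
      rw [hi, splitSp_append_spacefree w _ (hsf w (by simp))]
      have ihr := ih (by simp) (fun x hx => hsf x (by simp [hx]))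
      simp [splitSp, ihr]

-- lower facts
theorem charOfNat_toNat (n : Nat) (h : n < 55296) : (Char.ofNat n).toNat = n := by
  unfold Char.ofNat
  split
  · rfl
  · rename_i hv
    exact absurd (by constructor; omega) hv

theorem isupper_iff (c : Char) : PySem.Chars.isupper c = true ↔ 65 ≤ c.toNat ∧ c.toNat ≤ 90 := by
  simp only [PySem.Chars.isupper, Bool.and_eq_true, decide_eq_true_eq, Char.le_def]
  constructor
  · rintro ⟨h1, h2⟩
    exact ⟨UInt32.le_iff_toNat_le.mp h1, UInt32.le_iff_toNat_le.mp h2⟩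
  · rintro ⟨h1, h2⟩
    exact ⟨UInt32.le_iff_toNat_le.mpr h1, UInt32.le_iff_toNat_le.mpr h2⟩

theorem lowerChar_idem (c : Char) :
    PySem.Chars.lowerChar (PySem.Chars.lowerChar c) = PySem.Chars.lowerChar c := by
  unfold PySem.Chars.lowerChar
  by_cases h : PySem.Chars.isupper c = true
  · rw [if_pos h]
    obtain ⟨h1, h2⟩ := (isupper_iff c).mp h
    have ht : (Char.ofNat (c.toNat + 32)).toNat = c.toNat + 32 := charOfNat_toNat _ (by omega)
    rw [if_neg (by rw [isupper_iff, ht]; omega)]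
  · rw [if_neg h, if_neg h]

theorem lower_idem (w : List Char) :
    PySem.Chars.lower (PySem.Chars.lower w) = PySem.Chars.lower w := by
  simp [PySem.Chars.lower, List.map_map, Function.comp_def, lowerChar_idem]

theorem lowerChar_ne_space {c : Char} (hc : c ≠ ' ') : PySem.Chars.lowerChar c ≠ ' ' := by
  unfold PySem.Chars.lowerChar
  by_cases h : PySem.Chars.isupper c = true
  · rw [if_pos h]
    obtain ⟨h1, h2⟩ := (isupper_iff c).mp h
    have ht : (Char.ofNat (c.toNat + 32)).toNat = c.toNat + 32 := charOfNat_toNat _ (by omega)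
    intro he
    have h32 : (Char.ofNat (c.toNat + 32)).toNat = (' ' : Char).toNat := by rw [he]
    rw [ht] at h32
    have hsp : (' ' : Char).toNat = 32 := rfl
    omega
  · rw [if_neg h]; exact hc

theorem lower_spacefree {w : List Char} (hw : ' ' ∉ w) : ' ' ∉ PySem.Chars.lower w := by
  simp only [PySem.Chars.lower, List.mem_map]
  rintro ⟨c, hc, hce⟩
  exact lowerChar_ne_space (fun h => hw (h ▸ hc)) hce

-- predicate bridges
theorem endsSubB_eq (w : List Char) : endsSubB w = end_of_subpoint w := by
  unfold endsSubB end_of_subpoint pvSubpointEndersB pvSubpointEnders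
  cases h : w.getLast? <;> split_ifs <;> simp_all

theorem endsPointB_eq (w : List Char) : endsPointB w = end_of_point w := by
  unfold endsPointB end_of_point pvPointEndersB pvPointEnders
  cases h : w.getLast? <;> split_ifs <;> simp_all

-- the subsentence state of one sentence, as a left fold (proof-side)
def subStep (st : List (List Char) × List (List Char)) (w : List Char) :
    List (List Char) × List (List Char) :=
  let cur := st.2 ++ [w]
  if end_of_subpoint w then (st.1 ++ [PySem.Chars.join [' '] cur], []) else (st.1, cur)

def finishSub (st : List (List Char) × List (List Char)) : List (List Char) :=
  if st.2 ≠ [] then st.1 ++ [PySem.Chars.join [' '] st.2] else st.1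

def GoodWord (w : List Char) : Prop :=
  PySem.Chars.lower w = w ∧ w ≠ [] ∧ ' ' ∉ w

theorem subLoopA_eq_fold (ws : List (List Char)) (cur subs : List (List Char))
    (hws : ∀ w ∈ ws, PySem.Chars.lower w = w) :
    subLoopA ws cur subs = finishSub (ws.foldl subStep (subs, cur)) := by
  induction ws generalizing cur subs with
  | nil => simp [subLoopA, finishSub, List.length_pos_iff]
  | cons w rest ih =>
    have hw := hws w (by simp)
    have hrest : ∀ w ∈ rest, PySem.Chars.lower w = w := fun x hx => hws x (by simp [hx])
    simp only [subLoopA, hw, List.foldl_cons, subStep]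
    split
    · exact ih [] _ hrest
    · exact ih _ _ hrest

theorem subState_ne_nil (ws : List (List Char)) (s c : List (List Char))
    (h : s ≠ [] ∨ c ≠ []) :
    (ws.foldl subStep (s, c)).1 ≠ [] ∨ (ws.foldl subStep (s, c)).2 ≠ [] := by
  induction ws generalizing s c with
  | nil => exact h
  | cons w rest ih =>
    simp only [List.foldl_cons, subStep]
    split
    · exact ih _ _ (Or.inl (by simp))
    · exact ih _ _ (Or.inr (by simp))

theorem finishSub_ne_nil {ws : List (List Char)} (hne : ws ≠ []) :
    finishSub (ws.foldl subStep ([], [])) ≠ [] := by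
  cases ws with
  | nil => exact absurd rfl hne
  | cons w rest =>
    have h := subState_ne_nil rest (subStep ([], []) w).1 (subStep ([], []) w).2
      (by simp only [subStep]; split <;> simp)
    simp only [List.foldl_cons] at *
    unfold finishSub
    split
    · simp
    · rename_i hc
      rcases h with h | h
      · exact h
      · exact absurd (by simpa using hc) (by simpa using h)

-- A's subsplit of a joined sentence equals the fold of subStep over its words
theorem subsplitA_join (cur : List (List Char)) (hne : cur ≠ [])
    (hgood : ∀ w ∈ cur, GoodWord w) :
    subsplitA (PySem.Chars.join [' '] cur) = finishSub (cur.foldl subStep ([], [])) := by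
  have hsf : ∀ w ∈ cur, ' ' ∉ w := fun w hw => (hgood w hw).2.2
  have hlow : ∀ w ∈ cur, PySem.Chars.lower w = w := fun w hw => (hgood w hw).1
  unfold subsplitA
  rw [show PySem.Chars.join [' '] cur = List.intercalate [' '] cur from rfl]
  rw [splitOn_space_eq, splitSp_intercalate hne hsf, subLoopA_eq_fold _ _ _ hlow]

-- the main fusion lemma: A's sentence loop followed by subsplitting = B's fused pass
theorem fused_main (ws : List (List Char)) (cur : List (List Char))
    (acc : List (List Char))
    (hws : ∀ w ∈ ws, ' ' ∉ w) (hcur : ∀ w ∈ cur, GoodWord w) :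
    (sentLoopA ws cur acc).map subsplitA =
      fusedB ws (cur.foldl subStep ([], [])).1 (cur.foldl subStep ([], [])).2
        (acc.map subsplitA) := by
  induction ws generalizing cur acc with
  | nil =>
    by_cases hc : cur = []
    · subst hc
      simp [sentLoopA, fusedB]
    · simp only [sentLoopA, fusedB, List.length_pos_iff]
      rw [if_pos hc]
      have hfin : (if (List.foldl subStep ([], []) cur).2 ≠ [] then
          (List.foldl subStep ([], []) cur).1 ++
            [PySem.Chars.join [' '] (List.foldl subStep ([], []) cur).2]
          else (List.foldl subStep ([], []) cur).1) = finishSub (List.foldl subStep ([], []) cur) := rfl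
      rw [hfin, if_pos (finishSub_ne_nil hc)]
      rw [List.map_append, List.map_singleton, subsplitA_join cur hc hcur]
  | cons w rest ih =>
    have hwsf : ' ' ∉ w := hws w (by simp)
    have hrest : ∀ x ∈ rest, ' ' ∉ x := fun x hx => hws x (by simp [hx])
    by_cases hw0 : PySem.Chars.lower w = []
    · have hA : sentLoopA (w :: rest) cur acc = sentLoopA rest cur acc := by
        simp only [sentLoopA, hw0]
        norm_num
      have hB : fusedB (w :: rest) (List.foldl subStep ([], []) cur).1
          (List.foldl subStep ([], []) cur).2 (acc.map subsplitA) =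
          fusedB rest (List.foldl subStep ([], []) cur).1
            (List.foldl subStep ([], []) cur).2 (acc.map subsplitA) := by
        simp [fusedB, hw0]
      rw [hA, hB]
      exact ih cur acc hrest hcur
    · have hgw : GoodWord (PySem.Chars.lower w) :=
        ⟨lower_idem w, hw0, lower_spacefree hwsf⟩
      have hcur' : ∀ x ∈ cur ++ [PySem.Chars.lower w], GoodWord x := by
        intro x hx
        rcases List.mem_append.mp hx with h | h
        · exact hcur x h
        · simp at h; subst h; exact hgw
      have hfold : List.foldl subStep ([], []) (cur ++ [PySem.Chars.lower w]) =
          subStep (List.foldl subStep ([], []) cur) (PySem.Chars.lower w) := by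
        rw [List.foldl_append]; rfl
      have hB : fusedB (w :: rest) (List.foldl subStep ([], []) cur).1
          (List.foldl subStep ([], []) cur).2 (acc.map subsplitA) =
          (if end_of_point (PySem.Chars.lower w) then
            fusedB rest [] [] (acc.map subsplitA ++
              [finishSub (List.foldl subStep ([], []) (cur ++ [PySem.Chars.lower w]))])
           else
            fusedB rest (List.foldl subStep ([], []) (cur ++ [PySem.Chars.lower w])).1
              (List.foldl subStep ([], []) (cur ++ [PySem.Chars.lower w])).2
              (acc.map subsplitA)) := by
        simp only [fusedB, endsSubB_eq, endsPointB_eq]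
        rw [if_neg hw0, hfold]
        simp only [subStep, finishSub]
      have hA : sentLoopA (w :: rest) cur acc =
          (if end_of_point (PySem.Chars.lower w) then
            sentLoopA rest [] (acc ++ [PySem.Chars.join [' '] (cur ++ [PySem.Chars.lower w])])
           else sentLoopA rest (cur ++ [PySem.Chars.lower w]) acc) := by
        simp only [sentLoopA]
        rw [if_neg (by simpa [List.length_pos_iff, Nat.lt_iff_add_one_le] using hw0)]
      rw [hA, hB]
      by_cases hp : end_of_point (PySem.Chars.lower w) = true
      · rw [if_pos hp, if_pos hp]
        have hgoal := ih [] (acc ++ [PySem.Chars.join [' '] (cur ++ [PySem.Chars.lower w])])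
          hrest (by simp)
        simp only [List.foldl_nil, List.map_append, List.map_singleton] at hgoal
        rw [hgoal, subsplitA_join _ (by simp) hcur']
      · rw [if_neg hp, if_neg hp]
        exact ih _ acc hrest hcur'

-- fusedB only appends to out
theorem fusedB_out (ws : List (List Char)) (s c : List (List Char))
    (out : List (List (List Char))) :
    fusedB ws s c out = out ++ fusedB ws s c [] := by
  induction ws generalizing s c out with
  | nil =>
    simp only [fusedB]
    split <;> split <;> simp_all
  | cons w rest ih =>
    simp only [fusedB]
    split
    · exact ih _ _ _
    · split
      · rw [ih _ _ (out ++ _), ih _ _ ([] ++ _)]; simp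
      · exact ih _ _ _

-- the linewise fold commutes with subsplit-mapping
theorem linewise_fold (lines : List (List Char)) (acc : List (List Char)) :
    ((lines.foldl
        (fun acc line =>
          if PySem.Chars.isIn [':'] line = false then acc
          else sentLoopA (PySem.Chars.splitOn (PySem.Chars.strip line) [' ']) [] acc)
        acc).map subsplitA) =
      lines.foldl
        (fun out line =>
          if PySem.Chars.isIn [':'] line then
            fusedB (PySem.Chars.splitOn (PySem.Chars.strip line) [' ']) [] [] out
          else out)
        (acc.map subsplitA) := by
  induction lines generalizing acc with
  | nil => simp
  | cons line rest ih =>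
    simp only [List.foldl_cons]
    by_cases h : PySem.Chars.isIn [':'] line = false
    · simp only [h, if_pos, Bool.false_eq_true, if_false]
      exact ih acc
    · have h' : PySem.Chars.isIn [':'] line = true := by
        cases hh : PySem.Chars.isIn [':'] line
        · exact absurd hh h
        · rfl
      simp only [h]
      rw [ih]
      congr 1
      have hsf : ∀ w ∈ PySem.Chars.splitOn (PySem.Chars.strip line) [' '], ' ' ∉ w := by
        intro w hw
        rw [splitOn_space_eq] at hw
        exact splitSp_spacefree hw
      simpa using fused_main (PySem.Chars.splitOn (PySem.Chars.strip line) [' ']) [] acc hsf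
        (by simp)

theorem words_nonlinewise_eq (mr : List Char) :
    string_to_record_nonlinewise mr =
      PySem.Chars.splitOn
        (PySem.Chars.join [' ']
          ((PySem.Chars.splitOn mr ['\n']).filter (· ≠ []))) [' '] := by
  unfold string_to_record_nonlinewise
  congr 2
  have hfun : (fun (acc : List (List Char)) line =>
        if line.length < 1 then acc else acc ++ [line]) =
      (fun acc line => if (fun (l : List Char) => decide (l ≠ [])) line = true
        then acc ++ [id line] else acc) := by
    funext acc line
    by_cases h : line = [] <;> simp [h]
  rw [hfun, PySem.List.foldl_append_if]
  simp [List.map_id]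

theorem foldlB_out (lines : List (List Char)) (out : List (List (List Char))) :
    lines.foldl
      (fun out line =>
        if PySem.Chars.isIn [':'] line then
          fusedB (PySem.Chars.splitOn (PySem.Chars.strip line) [' ']) [] [] out
        else out) out =
    out ++ lines.foldl
      (fun out line =>
        if PySem.Chars.isIn [':'] line then
          fusedB (PySem.Chars.splitOn (PySem.Chars.strip line) [' ']) [] [] out
        else out) [] := by
  induction lines generalizing out with
  | nil => simp
  | cons line rest ih =>
    simp only [List.foldl_cons]
    by_cases h : PySem.Chars.isIn [':'] line = true
    · rw [if_pos h, if_pos h, ih, ih (fusedB _ [] [] [])]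
      rw [fusedB_out _ [] [] out]
      simp
    · rw [if_neg h, if_neg h, ih]

-- ===== VERDICT (by name: the statement is the Claim_ definition above) =====
theorem load_medical_record_subsentences_spec : Claim_equal_load_medical_record_subsentences := by
  intro mr _hdom
  unfold Spec_load_medical_record_subsentences
  unfold load_medical_record_subsentences load_medical_record_subsentences_alt
  simp only [words_nonlinewise_eq, load_medical_record_linewise]
  have hw : ∀ x ∈ PySem.Chars.splitOn
      (PySem.Chars.join [' ']
        ((PySem.Chars.splitOn mr.toList ['\n']).filter (· ≠ []))) [' '], ' ' ∉ x := by
    intro x hx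
    rw [splitOn_space_eq] at hx
    exact splitSp_spacefree hx
  have h1 := fused_main _ [] [] hw (by simp)
  simp only [List.map_nil, List.foldl_nil] at h1
  rw [List.map_append, h1, linewise_fold]
  rw [foldlB_out (PySem.Chars.splitOn mr.toList ['\n']) (fusedB _ [] [] [])]
  simp
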